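-- pv_equiv track=rewrite | github.com/edurange/edurange-flask | log_analysis/kypo-analyze.py | check_milestones
-- ===== SOURCE A (Python) =====
-- def check_milestones(input, milestones, completed_milestones):
--     tag = ''
--     for i, m in enumerate(milestones):
--         commands = m.split('|')[0].split(',')
--         args = m.split('|')[1].split(',')
--         found_command = False
--         found_arg = False
--         for c in commands:
--             if c in input:
--                 found_command = True
--         for a in args:
--             if a in input:
--                 found_arg = True
--
--         if found_arg and found_command:
--             # if completed_milestones[i] == 0:
--             tag = 'M' + str(i) + ' '
--             #     completed_milestones[i] = 1
--             #
--             # elif completed_milestones[i] == 1: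
--             #     tag = 'V' + str(i) + ' '
--
--         elif found_command and not found_arg:
--             if not tag.startswith('M') and not tag.startswith('V'):
--                 tag += 'A' + str(i) + ' '
--     if tag == '':
--         tag = 'U'
--
--     return tag, completed_milestones
-- ===== SOURCE B (Python) =====
-- def check_milestones(input, milestones, completed_milestones):
--     def hit(part):
--         return any(s in input for s in part.split(','))
--     pairs = [(hit(f[0]), hit(f[1])) for f in (m.split('|') for m in milestones)]
--     for i in range(len(pairs) - 1, -1, -1):
--         c, a = pairs[i]
--         if c and a:
--             return 'M' + str(i) + ' ', completed_milestones
--     a_tags = ''.join('A' + str(i) + ' ' for i, (c, a) in enumerate(pairs) if c and not a)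
--     return (a_tags or 'U'), completed_milestones
-- ===== Notes on version B (the rewrite author's own statement) =====
-- stated objective: simpler
-- what changed: B first materialises a per-milestone (command-hit, arg-hit) boolean matrix, then searches it BACKWARDS with an early return for the last full match, and only if none exists renders all partial-match tags by a filter+join over the matrix, replacing A's forward pass over a mutable tag string with startswith guards and an empty-string sentinel.
import Mathlib
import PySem

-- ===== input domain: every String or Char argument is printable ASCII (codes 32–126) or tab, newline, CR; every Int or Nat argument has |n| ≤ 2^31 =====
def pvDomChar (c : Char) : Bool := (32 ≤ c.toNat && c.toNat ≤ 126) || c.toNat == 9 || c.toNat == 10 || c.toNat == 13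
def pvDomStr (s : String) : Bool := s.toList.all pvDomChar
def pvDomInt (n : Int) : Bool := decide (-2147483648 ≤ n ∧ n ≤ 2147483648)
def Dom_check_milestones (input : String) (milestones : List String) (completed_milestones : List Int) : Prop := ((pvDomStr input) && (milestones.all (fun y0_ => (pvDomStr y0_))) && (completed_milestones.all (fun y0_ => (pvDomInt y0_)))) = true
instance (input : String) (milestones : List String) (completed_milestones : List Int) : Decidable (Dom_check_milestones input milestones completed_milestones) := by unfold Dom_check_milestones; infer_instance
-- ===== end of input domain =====

-- B precomputes a (command-hit, arg-hit) matrix, searches it backwards for the last full match, and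
-- renders partial tags by filter+join only when no full match exists; same cost, simpler.

-- ===== PORT A =====
-- loop body of A's 'for i, m in enumerate(milestones)'; the accumulator is the mutable string 'tag'.
-- m.split('|') = Str.split? (some, since the separator is non-empty); [k] = pyGet? (getD "" is unreachable inside Pre_).
def pvStepA (input : String) (tag : String) (im : Int × String) : String :=
  let commands := ((PySem.Str.split? ((PySem.List.pyGet? ((PySem.Str.split? im.2 "|").getD []) 0).getD "") ",").getD [])
  let args := ((PySem.Str.split? ((PySem.List.pyGet? ((PySem.Str.split? im.2 "|").getD []) 1).getD "") ",").getD [])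
  let found_command := commands.foldl (fun f c => if PySem.Str.isIn c input then true else f) false
  let found_arg := args.foldl (fun f a => if PySem.Str.isIn a input then true else f) false
  if found_arg && found_command then "M" ++ PySem.Int.toStr im.1 ++ " "
  else if found_command && !found_arg then
    if !(PySem.Str.startswith tag "M") && !(PySem.Str.startswith tag "V") then
      tag ++ ("A" ++ PySem.Int.toStr im.1 ++ " ")
    else tag
  else tag

def check_milestones (input : String) (milestones : List String) (completed_milestones : List Int) : String × List Int :=
  let tag := (PySem.List.enumerate milestones).foldl (pvStepA input) ""
  (if tag = "" then "U" else tag, completed_milestones)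

-- ===== PORT B =====
-- B's hit(part) applied to fields [0] and [1] of m.split('|'): the per-milestone boolean pair.
def pvPair (input : String) (m : String) : Bool × Bool :=
  let fields := (PySem.Str.split? m "|").getD []
  (((PySem.Str.split? ((PySem.List.pyGet? fields 0).getD "") ",").getD []).any (fun s => PySem.Str.isIn s input),
   ((PySem.Str.split? ((PySem.List.pyGet? fields 1).getD "") ",").getD []).any (fun s => PySem.Str.isIn s input))

-- B's 'for i in range(len(pairs)-1, -1, -1): … return' = first full match over the reversed enumeration.
def pvFindM : List (Int × (Bool × Bool)) → Option Int
  | [] => none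
  | (i, p) :: t => if p.1 && p.2 then some i else pvFindM t

def check_milestones_alt (input : String) (milestones : List String) (completed_milestones : List Int) : String × List Int :=
  let pairs := milestones.map (pvPair input)
  match pvFindM (PySem.List.enumerate pairs).reverse with
  | some i => ("M" ++ PySem.Int.toStr i ++ " ", completed_milestones)
  | none =>
    let a_tags := PySem.Str.join ""
      (((PySem.List.enumerate pairs).filter (fun ip => ip.2.1 && !ip.2.2)).map
        (fun ip => "A" ++ PySem.Int.toStr ip.1 ++ " "))
    (if a_tags = "" then "U" else a_tags, completed_milestones)

-- ===== PRECONDITION & SPEC =====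
-- Pre_ excludes milestones containing no '|': there m.split('|')[1] raises IndexError in A (and in B alike).
def Pre_check_milestones (input : String) (milestones : List String) (completed_milestones : List Int) : Prop :=
  milestones.all (fun m => PySem.Str.isIn "|" m) = true
instance (input : String) (milestones : List String) (completed_milestones : List Int) : Decidable (Pre_check_milestones input milestones completed_milestones) := by unfold Pre_check_milestones; infer_instance

def pvWitness_check_milestones : String × List String × List Int := ("ls -a", ["ls,cat|-a", "rm|-rf"], [0, 0])

def Spec_check_milestones (input : String) (milestones : List String) (completed_milestones : List Int) (out : String × List Int) : Prop := out = check_milestones_alt input milestones completed_milestones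
instance (input : String) (milestones : List String) (completed_milestones : List Int) (out : String × List Int) : Decidable (Spec_check_milestones input milestones completed_milestones out) := by unfold Spec_check_milestones; infer_instance

-- ===== CLAIM (what is proved, stated in full; the proofs are below) =====
def Claim_equal_check_milestones : Prop := ∀ (input : String) (milestones : List String) (completed_milestones : List Int), Dom_check_milestones input milestones completed_milestones → Pre_check_milestones input milestones completed_milestones → Spec_check_milestones input milestones completed_milestones (check_milestones input milestones completed_milestones)

-- ===== LEMMAS AND PROOFS =====

-- proof-side model of A's loop: the state A's mutable tag encodes — last full-match index, command-only indices
def pvStep2 (st : Option Int × List Int) (ip : Int × (Bool × Bool)) : Option Int × List Int :=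
  if ip.2.1 then
    if ip.2.2 then (some ip.1, st.2) else (st.1, st.2 ++ [ip.1])
  else st

-- the tag A's mutable string holds, as a function of that state
def pvRender (o : Option Int) (hs : List Int) : String :=
  match o with
  | some i => "M" ++ PySem.Int.toStr i ++ " "
  | none => PySem.Str.join "" (hs.map (fun i => "A" ++ PySem.Int.toStr i ++ " "))

lemma pv_toList_inj {s t : String} (h : s.toList = t.toList) : s = t := by
  have := congrArg String.ofList h
  simpa using this

lemma pv_chars_join_nil (l : List (List Char)) : PySem.Chars.join [] l = l.flatten := by
  induction l with
  | nil => simp [PySem.Chars.join_nil]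
  | cons a t ih =>
    cases t with
    | nil => simp [PySem.Chars.join_singleton]
    | cons b u => rw [PySem.Chars.join_cons_cons]; simp [ih]

lemma pv_tagA_toList (i : Int) :
    ("A" ++ PySem.Int.toStr i ++ " ").toList = 'A' :: (PySem.Int.toChars i ++ [' ']) := by
  simp [String.toList_append]

lemma pvRender_none_toList (hs : List Int) :
    (pvRender none hs).toList = (hs.map (fun i => 'A' :: (PySem.Int.toChars i ++ [' ']))).flatten := by
  have hf : (String.toList ∘ fun i : Int => "A" ++ PySem.Int.toStr i ++ " ")
      = fun i : Int => 'A' :: (PySem.Int.toChars i ++ [' ']) := by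
    funext i; exact pv_tagA_toList i
  simp [pvRender, PySem.Str.toList_join, pv_chars_join_nil, List.map_map, hf]

lemma pvRender_some_toList (i : Int) (hs : List Int) :
    (pvRender (some i) hs).toList = 'M' :: (PySem.Int.toChars i ++ [' ']) := by
  simp [pvRender, String.toList_append]

lemma pv_sw_none_M (hs : List Int) : PySem.Str.startswith (pvRender none hs) "M" = false := by
  rw [Bool.eq_false_iff]
  intro hsw
  rw [PySem.Str.startswith_eq] at hsw
  have hp := (PySem.Chars.startswith_iff _ _).mp hsw
  rw [pvRender_none_toList] at hp
  cases hs with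
  | nil => simp at hp
  | cons a t => simp [List.cons_prefix_cons] at hp

lemma pv_sw_none_V (hs : List Int) : PySem.Str.startswith (pvRender none hs) "V" = false := by
  rw [Bool.eq_false_iff]
  intro hsw
  rw [PySem.Str.startswith_eq] at hsw
  have hp := (PySem.Chars.startswith_iff _ _).mp hsw
  rw [pvRender_none_toList] at hp
  cases hs with
  | nil => simp at hp
  | cons a t => simp [List.cons_prefix_cons] at hp

lemma pv_sw_some_M (i : Int) (hs : List Int) : PySem.Str.startswith (pvRender (some i) hs) "M" = true := by
  rw [PySem.Str.startswith_eq]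
  apply (PySem.Chars.startswith_iff _ _).mpr
  rw [pvRender_some_toList]
  simp [List.cons_prefix_cons]

lemma pvRender_snoc (hs : List Int) (i : Int) :
    pvRender none (hs ++ [i]) = pvRender none hs ++ ("A" ++ PySem.Int.toStr i ++ " ") := by
  apply pv_toList_inj
  rw [String.toList_append, pvRender_none_toList, pvRender_none_toList, pv_tagA_toList]
  simp

lemma pvRender_none_nil : pvRender none ([] : List Int) = "" := by
  apply pv_toList_inj
  rw [pvRender_none_toList]
  simp

lemma pvRender_some_ne (i : Int) (hs : List Int) : pvRender (some i) hs ≠ "" := by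
  intro hc
  have := congrArg String.toList hc
  rw [pvRender_some_toList] at this
  simp at this

-- A's loop body, on the rendered state, is pvStep2 on the pair matrix entry
lemma pvStep_eq (input : String) (o : Option Int) (hs : List Int) (x : Int × String) :
    pvStepA input (pvRender o hs) x
      = pvRender (pvStep2 (o, hs) (x.1, pvPair input x.2)).1 (pvStep2 (o, hs) (x.1, pvPair input x.2)).2 := by
  unfold pvStepA pvStep2 pvPair
  simp only [PySem.List.foldl_if_true_eq, Bool.false_or]
  cases hc : ((PySem.Str.split? ((PySem.List.pyGet? ((PySem.Str.split? x.2 "|").getD []) 0).getD "") ",").getD []).any (fun c => PySem.Str.isIn c input) with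
  | false => simp [hc]
  | true =>
    cases ha : ((PySem.Str.split? ((PySem.List.pyGet? ((PySem.Str.split? x.2 "|").getD []) 1).getD "") ",").getD []).any (fun a => PySem.Str.isIn a input) with
    | true => simp [hc, ha, pvRender]
    | false =>
      cases o with
      | none =>
        rw [if_neg (by simp [ha]), if_pos (by simp [hc, ha]), if_pos (by rw [pv_sw_none_M, pv_sw_none_V]; rfl)]
        simp [hc, ha, pvRender_snoc]
      | some i =>
        rw [if_neg (by simp [ha]), if_pos (by simp [hc, ha]), if_neg (by rw [pv_sw_some_M]; simp)]
        simp [hc, ha, pvRender]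

lemma pvLoop_eq (input : String) (l : List (Int × String)) (o : Option Int) (hs : List Int) :
    l.foldl (pvStepA input) (pvRender o hs)
      = pvRender ((l.map (fun im => (im.1, pvPair input im.2))).foldl pvStep2 (o, hs)).1
                 ((l.map (fun im => (im.1, pvPair input im.2))).foldl pvStep2 (o, hs)).2 := by
  induction l generalizing o hs with
  | nil => simp
  | cons x t ih =>
    simp only [List.foldl_cons, List.map_cons]
    rw [pvStep_eq input o hs x]
    have := ih (pvStep2 (o, hs) (x.1, pvPair input x.2)).1 (pvStep2 (o, hs) (x.1, pvPair input x.2)).2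
    simpa using this

-- the enumeration of the mapped list is the mapped enumeration
lemma pv_enumerate_map {α β : Type} (f : α → β) (l : List α) (s : Int) :
    PySem.List.enumerate (l.map f) s = (PySem.List.enumerate l s).map (fun im => (im.1, f im.2)) := by
  induction l generalizing s with
  | nil => simp [PySem.List.enumerate_nil]
  | cons x t ih => simp [PySem.List.enumerate_cons, ih]

lemma pvFindM_append (u v : List (Int × (Bool × Bool))) :
    pvFindM (u ++ v) = match pvFindM u with | some i => some i | none => pvFindM v := by
  induction u with
  | nil => simp [pvFindM]
  | cons x t ih =>
    rcases x with ⟨i, p⟩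
    by_cases h : (p.1 && p.2) = true
    · simp [pvFindM, h]
    · simp [pvFindM, h, ih]

-- the state's first component is the last full-match index = first match of the reversed list
lemma pvFold2_fst (l : List (Int × (Bool × Bool))) (o : Option Int) (hs : List Int) :
    (l.foldl pvStep2 (o, hs)).1 = match pvFindM l.reverse with | some i => some i | none => o := by
  induction l generalizing o hs with
  | nil => simp [pvFindM]
  | cons x t ih =>
    rcases x with ⟨i, p⟩
    simp only [List.foldl_cons, List.reverse_cons, pvFindM_append]
    by_cases hc : p.1 = true
    · by_cases ha : p.2 = true
      · rw [ih]
        cases hf : pvFindM t.reverse <;> simp [pvStep2, hc, ha, pvFindM, hf]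
      · rw [ih]
        cases hf : pvFindM t.reverse <;>
          simp [pvStep2, hc, Bool.eq_false_iff.mpr ha, pvFindM, hf,
                show (p.1 && p.2) = false by simp [hc, Bool.eq_false_iff.mpr ha]]
    · rw [ih]
      cases hf : pvFindM t.reverse <;>
        simp [pvStep2, Bool.eq_false_iff.mpr hc, pvFindM, hf,
              show (p.1 && p.2) = false by simp [Bool.eq_false_iff.mpr hc]]

-- the state's second component is the list of command-only indices
lemma pvFold2_snd (l : List (Int × (Bool × Bool))) (o : Option Int) (hs : List Int) :
    (l.foldl pvStep2 (o, hs)).2 = hs ++ (l.filter (fun ip => ip.2.1 && !ip.2.2)).map Prod.fst := by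
  induction l generalizing o hs with
  | nil => simp
  | cons x t ih =>
    rcases x with ⟨i, p⟩
    by_cases hc : p.1 = true
    · by_cases ha : p.2 = true
      · simp [pvStep2, hc, ha, List.foldl_cons, ih, List.filter_cons]
      · simp [pvStep2, hc, Bool.eq_false_iff.mpr ha, List.foldl_cons, ih, List.filter_cons]
    · simp [pvStep2, Bool.eq_false_iff.mpr hc, List.foldl_cons, ih, List.filter_cons]

-- A's rendered no-match tag is exactly B's join
lemma pvRender_none_eq_join (l : List (Int × (Bool × Bool))) :
    pvRender none ((l.filter (fun ip => ip.2.1 && !ip.2.2)).map Prod.fst)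
      = PySem.Str.join "" ((l.filter (fun ip => ip.2.1 && !ip.2.2)).map
          (fun ip => "A" ++ PySem.Int.toStr ip.1 ++ " ")) := by
  unfold pvRender
  rw [List.map_map]
  rfl

-- ===== VERDICT (by name: the statement is the Claim_ definition above) =====
theorem check_milestones_spec : Claim_equal_check_milestones := by
  intro input milestones completed_milestones _ _
  have hA : (PySem.List.enumerate milestones).foldl (pvStepA input) ""
      = pvRender ((PySem.List.enumerate (milestones.map (pvPair input))).foldl pvStep2 (none, [])).1
                 ((PySem.List.enumerate (milestones.map (pvPair input))).foldl pvStep2 (none, [])).2 := by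
    rw [show ("" : String) = pvRender none [] from pvRender_none_nil.symm, pvLoop_eq,
        ← pv_enumerate_map]
  simp only [Spec_check_milestones, check_milestones, check_milestones_alt, hA,
    pvFold2_fst, pvFold2_snd, List.nil_append]
  cases hf : pvFindM (PySem.List.enumerate (milestones.map (pvPair input))).reverse with
  | some i =>
    rw [if_neg (pvRender_some_ne i _)]
    simp [pvRender]
  | none =>
    rw [pvRender_none_eq_join]
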